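-- pv_equiv track=rewrite | github.com/mkwiatek770/code-snippets | Libraries/multiprocessing/most-divisors.py | max_divisors_number
-- ===== SOURCE A (Python) =====
-- def divisors_num(number: int):
--     divisors = 0
--     for divisor in range(1, number + 1):
--         if number % divisor == 0:
--             divisors += 1
--     return divisors
--
-- def max_divisors_number(start: int = 1, end: int = 1000):
--     best_number = start
--     most_divisors = 0
--     for n in range(start, end + 1):
--         divisors = divisors_num(n)
--         if divisors > most_divisors:
--             best_number = n
--             most_divisors = divisors
--     return best_number, most_divisors
-- ===== SOURCE B (Python) =====
-- def max_divisors_number(start: int = 1, end: int = 1000):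
--     lo = max(start, 1)
--     if lo > end:
--         return start, 0
--     # divisor-count sieve over the scanned window: counts[n] = number of divisors of n
--     counts = {}
--     for d in range(1, end + 1):
--         for m in range(((lo + d - 1) // d) * d, end + 1, d):
--             counts[m] = counts.get(m, 0) + 1
--     best_number, most_divisors = start, 0
--     for n in range(lo, end + 1):
--         c = counts.get(n, 0)
--         if c > most_divisors:
--             best_number, most_divisors = n, c
--     return best_number, most_divisors
-- ===== Notes on version B (the rewrite author's own statement) =====
-- stated objective: alternative
-- what changed: Replaces the per-number trial-division divisor count (a double loop re-counting divisors of each n from scratch) by a single divisor-count sieve over multiples within the scanned window, then one scan reading the precomputed counts.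
import Mathlib
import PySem

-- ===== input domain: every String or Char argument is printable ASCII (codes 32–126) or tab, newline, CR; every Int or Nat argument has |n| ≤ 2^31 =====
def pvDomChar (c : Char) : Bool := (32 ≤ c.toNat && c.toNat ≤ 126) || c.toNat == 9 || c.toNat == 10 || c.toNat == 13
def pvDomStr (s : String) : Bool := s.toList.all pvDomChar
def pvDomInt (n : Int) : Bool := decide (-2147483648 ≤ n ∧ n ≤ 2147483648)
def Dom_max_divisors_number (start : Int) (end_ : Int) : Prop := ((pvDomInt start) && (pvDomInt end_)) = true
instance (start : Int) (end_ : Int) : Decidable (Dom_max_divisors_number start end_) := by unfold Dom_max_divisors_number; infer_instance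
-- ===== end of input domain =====

-- B replaces A's per-number trial division by a divisor-count sieve over the scanned window; proved to return the same pair.

-- ===== PORT A =====
def divisorsNum (number : Int) : Int :=
  (PySem.List.pyRange 1 (number + 1) 1).foldl
    (fun divisors divisor => if PySem.Int.mod number divisor == 0 then divisors + 1 else divisors) 0

def max_divisors_number (start : Int) (end_ : Int) : Int × Int :=
  (PySem.List.pyRange start (end_ + 1) 1).foldl
    (fun st n =>
      let divisors := divisorsNum n
      if divisors > st.2 then (n, divisors) else st)
    (start, 0)

-- ===== PORT B =====
def sieveCounts (lo : Int) (end_ : Int) : PySem.Dict Int Int :=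
  (PySem.List.pyRange 1 (end_ + 1) 1).foldl
    (fun counts d =>
      (PySem.List.pyRange (PySem.Int.floordiv (lo + d - 1) d * d) (end_ + 1) d).foldl
        (fun c m => c.insert m (c.getD m 0 + 1)) counts)
    PySem.Dict.empty

def max_divisors_number_alt (start : Int) (end_ : Int) : Int × Int :=
  let lo := max start 1
  if end_ < lo then (start, 0)
  else
    let counts := sieveCounts lo end_
    (PySem.List.pyRange lo (end_ + 1) 1).foldl
      (fun st n =>
        let c := counts.getD n 0
        if c > st.2 then (n, c) else st)
      (start, 0)

-- ===== PRECONDITION & SPEC =====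
def Spec_max_divisors_number (start : Int) (end_ : Int) (out : Int × Int) : Prop := out = max_divisors_number_alt start end_
instance (start : Int) (end_ : Int) (out : Int × Int) : Decidable (Spec_max_divisors_number start end_ out) := by unfold Spec_max_divisors_number; infer_instance

-- ===== CLAIM (what is proved, stated in full; the proofs are below) =====
def Claim_equal_max_divisors_number : Prop := ∀ (start : Int) (end_ : Int), Dom_max_divisors_number start end_ → Spec_max_divisors_number start end_ (max_divisors_number start end_)

-- ===== LEMMAS AND PROOFS =====

-- value at n after the nested insert-add-one sieve
theorem getD_sieve (L : List Int) (g : Int → List Int) (dinit : PySem.Dict Int Int) (n : Int) :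
    (L.foldl (fun counts d => (g d).foldl (fun c m => c.insert m (c.getD m 0 + 1)) counts) dinit).getD n 0
      = dinit.getD n 0 + (L.map (fun d => ((g d).count n : Int))).sum := by
  induction L generalizing dinit with
  | nil => simp
  | cons d L ih =>
      simp only [List.foldl_cons, ih, PySem.Dict.getD_foldl_insert_add_one, List.map_cons,
        List.sum_cons]
      ring

theorem nodup_pyRange_step (a b d : Int) (hd : 0 < d) : (PySem.List.pyRange a b d).Nodup := by
  rw [PySem.List.pyRange_of_pos a b hd]
  refine List.Nodup.map ?_ (List.nodup_range)
  intro x y h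
  simp only at h
  have : (x : Int) = (y : Int) := by nlinarith [h]
  exact_mod_cast this

-- the inner range of B's sieve hits exactly the multiples of d inside [lo, end_]
theorem count_window_multiples (d lo b n : Int) (hd : 0 < d) :
    ((PySem.List.pyRange (PySem.Int.floordiv (lo + d - 1) d * d) b d).count n : Int)
      = if d ∣ n ∧ lo ≤ n ∧ n < b then 1 else 0 := by
  set q : Int := PySem.Int.floordiv (lo + d - 1) d with hq
  have hbr : q * d ≤ lo + d - 1 ∧ lo + d - 1 < (q + 1) * d :=
    (PySem.Int.floordiv_eq_iff_of_pos hd).mp hq.symm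
  have hfl : lo ≤ q * d := by nlinarith [hbr.2]
  have hfu : q * d ≤ lo + d - 1 := hbr.1
  have hmem : n ∈ PySem.List.pyRange (q * d) b d ↔ d ∣ n ∧ lo ≤ n ∧ n < b := by
    rw [PySem.List.mem_pyRange_iff_of_pos hd]
    constructor
    · rintro ⟨h1, h2, h3⟩
      have hdvd : d ∣ n := by
        have := dvd_add h3 (Dvd.intro q (mul_comm d q))
        simpa using this
      exact ⟨hdvd, le_trans hfl h1, h2⟩
    · rintro ⟨hdvd, h1, h2⟩
      obtain ⟨c, hc⟩ := hdvd
      have hcq : q ≤ c := by nlinarith [h1, hfu]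
      refine ⟨?_, h2, ?_⟩
      · rw [hc]; nlinarith [hcq]
      · exact dvd_sub (by rw [hc]; exact Dvd.intro c rfl) (Dvd.intro q (mul_comm d q))
  by_cases hn : n ∈ PySem.List.pyRange (q * d) b d
  · rw [List.count_eq_one_of_mem (nodup_pyRange_step _ b d hd) hn]
    rw [hmem] at hn
    simp [hn]
  · rw [List.count_eq_zero_of_not_mem hn]
    rw [hmem] at hn
    simp [hn]

theorem divisorsNum_eq_countP (n : Int) :
    divisorsNum n = ((PySem.List.pyRange 1 (n + 1) 1).countP
      (fun d => PySem.Int.mod n d == 0) : Int) := by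
  unfold divisorsNum
  rw [PySem.List.foldl_if_add_one]
  simp

theorem divisorsNum_nonpos (n : Int) (h : n ≤ 0) : divisorsNum n = 0 := by
  unfold divisorsNum
  rw [PySem.List.pyRange_one_eq_nil (by omega)]
  rfl

theorem sieve_getD (lo end_ n : Int) (hlo : 1 ≤ lo) (h1 : lo ≤ n) (h2 : n ≤ end_) :
    (sieveCounts lo end_).getD n 0 = divisorsNum n := by
  unfold sieveCounts
  rw [getD_sieve]
  have hmap : (PySem.List.pyRange 1 (end_ + 1) 1).map
        (fun d => ((PySem.List.pyRange (PySem.Int.floordiv (lo + d - 1) d * d) (end_ + 1) d).count n : Int))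
      = (PySem.List.pyRange 1 (end_ + 1) 1).map
        (fun d => if (decide (d ∣ n)) = true then (1 : Int) else 0) := by
    refine List.map_congr_left ?_
    intro d hd
    rw [PySem.List.mem_pyRange_one] at hd
    rw [count_window_multiples d lo (end_ + 1) n (by omega)]
    have hnb : n < end_ + 1 := by omega
    by_cases hdvd : d ∣ n <;> simp [hdvd, h1, hnb]
  rw [hmap, PySem.List.sum_map_ite_one_zero]
  rw [PySem.List.pyRange_one_append 1 (n + 1) (end_ + 1) (by omega) (by omega),
    List.countP_append]
  have hz : (PySem.List.pyRange (n + 1) (end_ + 1) 1).countP (fun d => decide (d ∣ n)) = 0 := by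
    rw [List.countP_eq_zero]
    intro d hd
    rw [PySem.List.mem_pyRange_one] at hd
    simp only [decide_eq_true_eq]
    intro hdvd
    have := Int.le_of_dvd (by omega) hdvd
    omega
  have hc : (PySem.List.pyRange 1 (n + 1) 1).countP (fun d => decide (d ∣ n))
      = (PySem.List.pyRange 1 (n + 1) 1).countP (fun d => PySem.Int.mod n d == 0) := by
    refine List.countP_congr ?_
    intro d _
    by_cases hdvd : d ∣ n
    · simp [hdvd, (PySem.Int.mod_eq_zero_iff_dvd n d).mpr hdvd]
    · have : ¬ PySem.Int.mod n d = 0 := fun h => hdvd ((PySem.Int.mod_eq_zero_iff_dvd n d).mp h)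
      simp [hdvd, this]
  rw [hz, hc, divisorsNum_eq_countP]
  simp

-- A's loop does nothing over numbers with zero divisor count when most_divisors starts at 0
theorem foldA_skip (L : List Int) (s : Int) (hL : ∀ n ∈ L, divisorsNum n = 0) :
    L.foldl (fun st n =>
        let divisors := divisorsNum n
        if divisors > st.2 then (n, divisors) else st) (s, 0) = (s, 0) := by
  induction L with
  | nil => rfl
  | cons x L ih =>
      have hx : divisorsNum x = 0 := hL x (List.mem_cons_self ..)
      simp only [List.foldl_cons, hx]
      have : ¬ ((0 : Int) > 0) := by omega
      simpa [this] using ih (fun n hn => hL n (List.mem_cons_of_mem _ hn))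

-- ===== VERDICT (by name: the statement is the Claim_ definition above) =====
theorem max_divisors_number_spec : Claim_equal_max_divisors_number := by
  intro start end_ _
  unfold Spec_max_divisors_number max_divisors_number max_divisors_number_alt
  simp only []
  by_cases hempty : end_ < max start 1
  · rw [if_pos hempty]
    by_cases hnil : end_ + 1 ≤ start
    · rw [PySem.List.pyRange_one_eq_nil hnil]
      rfl
    · refine foldA_skip _ _ ?_
      intro n hn
      rw [PySem.List.mem_pyRange_one] at hn
      exact divisorsNum_nonpos n (by omega)
  · rw [if_neg hempty]
    by_cases hstart : 1 ≤ start
    · have hmax : max start 1 = start := by omega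
      rw [hmax]
      refine PySem.List.foldl_congr_mem _ _ _ _ ?_
      intro acc n hn
      rw [PySem.List.mem_pyRange_one] at hn
      simp only [sieve_getD start end_ n (by omega) (by omega) (by omega)]
    · have hmax : max start 1 = 1 := by omega
      rw [hmax]
      rw [PySem.List.pyRange_one_append start 1 (end_ + 1) (by omega) (by omega),
        List.foldl_append]
      have hfirst : (PySem.List.pyRange start 1 1).foldl (fun st n =>
          let divisors := divisorsNum n
          if divisors > st.2 then (n, divisors) else st) (start, 0) = (start, 0) := by
        refine foldA_skip _ _ ?_
        intro n hn
        rw [PySem.List.mem_pyRange_one] at hn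
        exact divisorsNum_nonpos n (by omega)
      rw [hfirst]
      refine PySem.List.foldl_congr_mem _ _ _ _ ?_
      intro acc n hn
      rw [PySem.List.mem_pyRange_one] at hn
      simp only [sieve_getD 1 end_ n (by omega) (by omega) (by omega)]
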